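-- pv_equiv track=rewrite | github.com/davidgarciai554/ChinorrisBot | main.py | linea_salto
-- ===== SOURCE A (Python) =====
-- def linea_salto(texto, numeros):
--     if numeros < len(texto):
--         if texto[numeros] == " ":
--             texto = texto[:numeros] + "\n" + texto[numeros:].strip()
--             return texto
--         else:
--             numeros += 1
--             return linea_salto(texto, numeros)
--     return texto
-- ===== SOURCE B (Python) =====
-- def linea_salto(texto, numeros):
--     # Iterative re-implementation: scan indices numeros..len(texto)-1 with a
--     # for-loop instead of one-step recursion; same char-by-char membership
--     # test so negative `numeros` keeps Python's wraparound indexing.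
--     for i in range(numeros, len(texto)):
--         if texto[i] == " ":
--             return texto[:i] + "\n" + texto[i:].strip()
--     return texto
-- ===== Notes on version B (the rewrite author's own statement) =====
-- stated objective: simpler
-- what changed: Replaced the one-step tail recursion with a single for-loop over range(numeros, len(texto)) that returns at the first space, keeping the char-by-char test so negative indices still wrap.
import Mathlib
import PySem

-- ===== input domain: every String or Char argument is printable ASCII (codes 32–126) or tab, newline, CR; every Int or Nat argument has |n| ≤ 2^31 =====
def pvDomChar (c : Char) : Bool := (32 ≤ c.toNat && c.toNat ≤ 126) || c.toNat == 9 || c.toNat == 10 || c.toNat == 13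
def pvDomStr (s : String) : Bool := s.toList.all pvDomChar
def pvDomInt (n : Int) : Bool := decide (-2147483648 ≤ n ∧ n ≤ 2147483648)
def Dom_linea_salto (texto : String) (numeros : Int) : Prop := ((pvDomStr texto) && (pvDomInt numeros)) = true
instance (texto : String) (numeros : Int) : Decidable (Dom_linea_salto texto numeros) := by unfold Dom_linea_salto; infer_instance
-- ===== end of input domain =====

-- B replaces A's one-step tail recursion by a single for-loop over range(numeros, len) (simpler, same cost).

-- ===== PORT A =====
-- literal port of A's recursion; the `none` branch is Python's IndexError, excluded by Pre_
def linea_salto (texto : String) (numeros : Int) : String :=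
  if numeros < PySem.Str.len texto then
    match PySem.List.pyGet? texto.toList numeros with
    | some c =>
      if c = ' ' then
        String.ofList (PySem.List.slice texto.toList none (some numeros) ++
          '\n' :: PySem.Chars.strip (PySem.List.slice texto.toList (some numeros) none))
      else linea_salto texto (numeros + 1)
    | none => texto
  else texto
termination_by (PySem.Str.len texto - numeros).toNat
decreasing_by simp [PySem.Str.len] at *; omega

-- ===== PORT B =====
-- literal port of Source B: for i in range(numeros, len(texto)) with early return at the first space
def linea_salto_alt (texto : String) (numeros : Int) : String :=
  match (PySem.List.pyRange numeros (PySem.Str.len texto) 1).find?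
      (fun i => PySem.List.pyGet? texto.toList i == some ' ') with
  | some i =>
      String.ofList (PySem.List.slice texto.toList none (some i) ++
        '\n' :: PySem.Chars.strip (PySem.List.slice texto.toList (some i) none))
  | none => texto

-- ===== PRECONDITION & SPEC =====
-- Pre_ excludes exactly the inputs where Python A raises IndexError: numeros below -len(texto)
-- while still below len(texto) (the scan then indexes out of range). B raises there too.
def Pre_linea_salto (texto : String) (numeros : Int) : Prop :=
  -(texto.toList.length : Int) ≤ numeros ∨ (texto.toList.length : Int) ≤ numeros
instance (texto : String) (numeros : Int) : Decidable (Pre_linea_salto texto numeros) := by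
  unfold Pre_linea_salto; infer_instance

def pvWitness_linea_salto : String × Int := ("hola mundo", 0)

def Spec_linea_salto (texto : String) (numeros : Int) (out : String) : Prop := out = linea_salto_alt texto numeros
instance (texto : String) (numeros : Int) (out : String) : Decidable (Spec_linea_salto texto numeros out) := by unfold Spec_linea_salto; infer_instance

-- ===== CLAIM (what is proved, stated in full; the proofs are below) =====
def Claim_equal_linea_salto : Prop := ∀ (texto : String) (numeros : Int), Dom_linea_salto texto numeros → Pre_linea_salto texto numeros → Spec_linea_salto texto numeros (linea_salto texto numeros)

-- ===== LEMMAS AND PROOFS =====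

lemma linea_salto_key (texto : String) (k : Nat) :
    ∀ (numeros : Int), (PySem.Str.len texto - numeros).toNat ≤ k →
      Pre_linea_salto texto numeros →
      linea_salto texto numeros = linea_salto_alt texto numeros := by
  induction k with
  | zero =>
    intro numeros hk _
    have hge : ¬ numeros < PySem.Str.len texto := by simp at hk ⊢; omega
    rw [linea_salto, if_neg hge]
    have hnil : PySem.List.pyRange numeros (PySem.Str.len texto) 1 = [] :=
      PySem.List.pyRange_one_eq_nil (not_lt.mp hge)
    unfold linea_salto_alt
    rw [hnil]
    rfl
  | succ k ih =>
    intro numeros hk hpre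
    by_cases hlt : numeros < PySem.Str.len texto
    · have hrange : PySem.Raise.InRange texto.toList.length numeros := by
        unfold Pre_linea_salto at hpre
        rcases hpre with h | h
        · simp [PySem.Raise.InRange] at hlt h ⊢; omega
        · exfalso; simp at hlt h; omega
      obtain ⟨c, hc⟩ : ∃ c, PySem.List.pyGet? texto.toList numeros = some c := by
        rcases h' : PySem.List.pyGet? texto.toList numeros with _ | c
        · exact absurd ((PySem.List.pyGet?_eq_none_iff _ _).mp h') (by simpa using hrange)
        · exact ⟨c, rfl⟩
      have hcons : PySem.List.pyRange numeros (PySem.Str.len texto) 1 =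
          numeros :: PySem.List.pyRange (numeros + 1) (PySem.Str.len texto) 1 :=
        PySem.List.pyRange_one_cons hlt
      rw [linea_salto, if_pos hlt, hc]
      unfold linea_salto_alt
      rw [hcons]
      by_cases hsp : c = ' '
      · simp [hc, hsp]
      · have hpred : (PySem.List.pyGet? texto.toList numeros == some ' ') = false := by
          simp [hc, hsp]
        have hrec := ih (numeros + 1)
          (by simp at hk ⊢; omega)
          (by unfold Pre_linea_salto at hpre ⊢
              rcases hpre with h | h
              · exact Or.inl (by omega)
              · exact Or.inr (by omega))
        simp only [hsp, if_false, List.find?_cons, hpred]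
        rw [hrec]
        unfold linea_salto_alt
        rfl
    · have hnil : PySem.List.pyRange numeros (PySem.Str.len texto) 1 = [] :=
        PySem.List.pyRange_one_eq_nil (not_lt.mp hlt)
      rw [linea_salto, if_neg hlt]
      unfold linea_salto_alt
      rw [hnil]
      rfl

-- ===== VERDICT (by name: the statement is the Claim_ definition above) =====
theorem linea_salto_spec : Claim_equal_linea_salto := by
  intro texto numeros _ hpre
  exact linea_salto_key texto (PySem.Str.len texto - numeros).toNat numeros le_rfl hpre
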